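-- pv_equiv track=rewrite | github.com/marinaesca/CompetitionsCode | spring17/4:21/one.py | func
-- ===== SOURCE A (Python) =====
-- def func (word):
-- 	p1 = 0
-- 	p2 = len(word) - 1
-- 	count = 0
-- 	while(p1 <= p2):
-- 		if(word[p1] != word[p2]):
-- 			count += 1
-- 		p1 += 1
-- 		p2 -= 1
-- 	return count
-- ===== SOURCE B (Python) =====
-- def func(word):
--     count = 0
--     while len(word) >= 2:
--         count += word[0] != word[-1]
--         word = word[1:-1]
--     return count
-- ===== Notes on version B (the rewrite author's own statement) =====
-- stated objective: alternative
-- what changed: Instead of A's two index pointers walking inward over a fixed string, B repeatedly peels the string itself: compare the current first and last characters, then replace the string by its middle slice word[1:-1] until fewer than two characters remain.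
import Mathlib
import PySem

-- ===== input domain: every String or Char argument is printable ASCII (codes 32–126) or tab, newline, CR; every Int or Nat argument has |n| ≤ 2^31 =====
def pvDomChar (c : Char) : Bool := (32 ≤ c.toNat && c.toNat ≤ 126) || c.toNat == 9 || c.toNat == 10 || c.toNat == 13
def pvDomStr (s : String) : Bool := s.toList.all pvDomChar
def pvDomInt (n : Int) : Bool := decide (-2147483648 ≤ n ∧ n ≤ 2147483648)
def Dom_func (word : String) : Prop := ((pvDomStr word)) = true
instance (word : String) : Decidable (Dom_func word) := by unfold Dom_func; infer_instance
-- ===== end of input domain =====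

-- B replaces A's iterative two-pointer loop by structural recursion that compares the
-- outer characters and recurses on the stripped middle word[1:-1] (objective: alternative).

-- ===== PORT A =====
-- A's while loop: two pointers p1, p2 and the running count
def funcLoop (w : List Char) (p1 p2 count : Int) : Int :=
  if h : p1 ≤ p2 then
    funcLoop w (p1 + 1) (p2 - 1)
      (if PySem.List.pyGet? w p1 ≠ PySem.List.pyGet? w p2 then count + 1 else count)
  else count
termination_by (p2 + 1 - p1).toNat
decreasing_by omega

def func (word : String) : Int :=
  funcLoop word.toList 0 ((word.toList.length : Int) - 1) 0

-- ===== PORT B =====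
-- Source B's while loop: peel the outer characters, shrinking the list, with the running count
def func_altLoop (w : List Char) (count : Int) : Int :=
  if h : 2 ≤ w.length then
    func_altLoop (PySem.List.slice w (some 1) (some (-1)))
      (count + (if PySem.List.pyGet? w 0 ≠ PySem.List.pyGet? w (-1) then 1 else 0))
  else count
termination_by w.length
decreasing_by
  simp [PySem.List.length_slice, PySem.List.clampIdx]
  split <;> omega

def func_alt (word : String) : Int := func_altLoop word.toList 0

-- ===== PRECONDITION & SPEC =====
def Spec_func (word : String) (out : Int) : Prop := out = func_alt word
instance (word : String) (out : Int) : Decidable (Spec_func word out) := by unfold Spec_func; infer_instance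

-- ===== CLAIM (what is proved, stated in full; the proofs are below) =====
def Claim_equal_func : Prop := ∀ (word : String), Dom_func word → Spec_func word (func word)

-- ===== LEMMAS AND PROOFS =====

-- A's loop accumulates: the starting count factors out
theorem funcLoop_split (k : Nat) :
    ∀ (w : List Char) (p1 p2 c : Int), (p2 + 1 - p1).toNat ≤ k →
      funcLoop w p1 p2 c = c + funcLoop w p1 p2 0 := by
  induction k with
  | zero =>
    intro w p1 p2 c hk
    rw [funcLoop, dif_neg (by omega), funcLoop, dif_neg (by omega)]
    ring
  | succ k ih =>
    intro w p1 p2 c hk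
    by_cases h : p1 ≤ p2
    · rw [funcLoop, dif_pos h]
      conv_rhs => rw [funcLoop, dif_pos h]
      split_ifs
      · rw [ih w (p1 + 1) (p2 - 1) (c + 1) (by omega), ih w (p1 + 1) (p2 - 1) (0 + 1) (by omega)]
        ring
      · rw [ih w (p1 + 1) (p2 - 1) c (by omega)]
    · rw [funcLoop, dif_neg h, funcLoop, dif_neg h]; ring

-- on a word a :: (m ++ [b]), A's loop over the interior pointers is the loop on m
theorem funcLoop_shift (k : Nat) :
    ∀ (a b : Char) (m : List Char) (p1 p2 c : Int),
      (p2 + 1 - p1).toNat ≤ k → 0 ≤ p1 → p2 < (m.length : Int) →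
      funcLoop (a :: (m ++ [b])) (p1 + 1) (p2 + 1) c = funcLoop m p1 p2 c := by
  induction k with
  | zero =>
    intro a b m p1 p2 c hk h1 h2
    rw [funcLoop, dif_neg (by omega), funcLoop, dif_neg (by omega)]
  | succ k ih =>
    intro a b m p1 p2 c hk h1 h2
    by_cases h : p1 ≤ p2
    · rw [funcLoop, dif_pos (by omega)]
      conv_rhs => rw [funcLoop, dif_pos h]
      have e1 : PySem.List.pyGet? (a :: (m ++ [b])) (p1 + 1) = PySem.List.pyGet? m p1 := by
        have hc1 : p1 + 1 = ((p1.toNat + 1 : Nat) : Int) := by omega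
        have hc2 : p1 = ((p1.toNat : Nat) : Int) := by omega
        rw [hc1, PySem.List.pyGet?_natCast, hc2, PySem.List.pyGet?_natCast]
        simp only [List.getElem?_cons_succ]
        rw [List.getElem?_append_left (by omega)]
        rw [Int.toNat_natCast]
      have e2 : PySem.List.pyGet? (a :: (m ++ [b])) (p2 + 1) = PySem.List.pyGet? m p2 := by
        have hc1 : p2 + 1 = ((p2.toNat + 1 : Nat) : Int) := by omega
        have hc2 : p2 = ((p2.toNat : Nat) : Int) := by omega
        rw [hc1, PySem.List.pyGet?_natCast, hc2, PySem.List.pyGet?_natCast]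
        simp only [List.getElem?_cons_succ]
        rw [List.getElem?_append_left (by omega)]
        rw [Int.toNat_natCast]
      rw [e1, e2]
      have harr : p1 + 1 + 1 = (p1 + 1) + 1 := by ring
      have harr2 : p2 + 1 - 1 = (p2 - 1) + 1 := by ring
      rw [harr, harr2, ih a b m (p1 + 1) (p2 - 1) _ (by omega) (by omega) (by omega)]
    · rw [funcLoop, dif_neg (by omega), funcLoop, dif_neg h]

-- word[1:-1] on a :: (m ++ [bl]) strips exactly the outer characters
theorem slice_interior (a bl : Char) (m : List Char) :
    PySem.List.slice (a :: (m ++ [bl])) (some 1) (some (-1)) = m := by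
  simp [PySem.List.slice, PySem.List.clampIdx]
  rw [if_neg (by omega)]
  have h : (m.length + 1) - 1 = m.length := by omega
  rw [h, List.take_left]

-- slicing off both ends shortens the list
theorem slice_interior_len_lt (w : List Char) (h : 2 ≤ w.length) :
    (PySem.List.slice w (some 1) (some (-1))).length < w.length := by
  simp [PySem.List.length_slice, PySem.List.clampIdx]
  split <;> omega

-- B's loop accumulates: the starting count factors out
theorem altLoop_split (k : Nat) :
    ∀ (w : List Char) (c : Int), w.length ≤ k →
      func_altLoop w c = c + func_altLoop w 0 := by
  induction k with
  | zero =>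
    intro w c hk
    rw [func_altLoop, dif_neg (by omega), func_altLoop, dif_neg (by omega)]
    ring
  | succ k ih =>
    intro w c hk
    by_cases h : 2 ≤ w.length
    · rw [func_altLoop, dif_pos h]
      conv_rhs => rw [func_altLoop, dif_pos h]
      have hlt := slice_interior_len_lt w h
      rw [ih _ _ (by omega), ih _ (0 + _) (by omega)]
      ring
    · rw [func_altLoop, dif_neg h, func_altLoop, dif_neg h]; ring

-- the main equivalence, by strong induction on the length
theorem func_eq_alt (n : Nat) :
    ∀ (w : List Char), w.length ≤ n →
      funcLoop w 0 ((w.length : Int) - 1) 0 = func_altLoop w 0 := by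
  induction n with
  | zero =>
    intro w hw
    have hnil : w = [] := by cases w <;> simp_all
    subst hnil
    rw [funcLoop, dif_neg (by norm_num), func_altLoop, dif_neg (by norm_num)]
  | succ n ih =>
    intro w hw
    match w with
    | [] => rw [funcLoop, dif_neg (by norm_num), func_altLoop, dif_neg (by norm_num)]
    | [a] =>
      have e : ((([a] : List Char).length : Int) - 1) = 0 := by simp
      rw [e, funcLoop, dif_pos le_rfl,
        if_neg (by simp : ¬ (PySem.List.pyGet? [a] 0 ≠ PySem.List.pyGet? [a] 0)),
        funcLoop, dif_neg (by norm_num), func_altLoop, dif_neg (by norm_num)]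
    | a :: b0 :: t =>
      obtain ⟨m, bl, hmb⟩ : ∃ m bl, (b0 :: t) = m ++ [bl] :=
        ⟨(b0 :: t).dropLast, (b0 :: t).getLast (by simp),
          (List.dropLast_append_getLast (by simp)).symm⟩
      rw [hmb]
      have hlen : (((a :: (m ++ [bl])) : List Char).length : Int) = (m.length : Int) + 2 := by
        simp; omega
      rw [hlen]
      -- left side: one unfolding of A's loop, then shift to the interior list m
      rw [funcLoop, dif_pos (by omega)]
      have eg0 : PySem.List.pyGet? (a :: (m ++ [bl])) 0 = some a :=
        PySem.List.pyGet?_zero_cons a (m ++ [bl])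
      have egl : PySem.List.pyGet? (a :: (m ++ [bl])) ((m.length : Int) + 2 - 1) = some bl := by
        have h : ((m.length : Int) + 2 - 1) = ((m.length + 1 : Nat) : Int) := by push_cast; ring
        rw [h, PySem.List.pyGet?_natCast]
        simp
      rw [eg0, egl]
      have harr : (m.length : Int) + 2 - 1 - 1 = ((m.length : Int) - 1) + 1 := by ring
      rw [harr,
        funcLoop_shift m.length a bl m 0 ((m.length : Int) - 1) _ (by omega) (by omega) (by omega),
        funcLoop_split m.length m 0 ((m.length : Int) - 1) _ (by omega),
        ih m (by simp_all; omega)]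
      -- right side: one unfolding of B's loop on the interior list m
      conv_rhs => rw [func_altLoop]
      rw [dif_pos (by simp)]
      have egn : PySem.List.pyGet? (a :: (m ++ [bl])) (-1) = some bl :=
        PySem.List.pyGet?_neg_one_append_singleton (a :: m) bl
      rw [egn, eg0, slice_interior]
      split_ifs
      · rw [altLoop_split m.length m (0 + 1) le_rfl]
      · rw [altLoop_split m.length m (0 + 0) le_rfl]; ring

-- ===== VERDICT (by name: the statement is the Claim_ definition above) =====
theorem func_spec : Claim_equal_func := by
  intro word _
  unfold Spec_func func func_alt
  exact func_eq_alt word.toList.length word.toList le_rfl
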